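-- pv_equiv track=rewrite | github.com/probicheaux/brackend | brackend/schema.py | match_losers
-- ===== SOURCE A (Python) =====
-- def match_losers(from_losers, from_winners, round_index):
--     matches = []
--     assert len(from_losers) == len(from_winners)
--     if len(from_losers) == 1:
--         return [(from_losers[0], from_winners[0])]
--
--     round_index = round_index % 4
--     if round_index % 4 == 0:
--         pass
--     elif round_index % 4 == 1:
--         midpoint = len(from_winners) // 2
--         from_winners = from_winners[midpoint:] + from_winners[:midpoint]
--     elif round_index % 4 == 2:
--         midpoint = len(from_winners) // 2
--         from_winners = from_winners[midpoint:] + from_winners[:midpoint]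
--         from_winners = from_winners[::-1]
--     elif round_index % 4 == 3:
--         from_winners = from_winners[::-1]
--     else:
--         assert False
--
--     for p1, p2 in zip(from_losers, from_winners):
--         proposed_match = (p1, p2)
--         matches.append(proposed_match)
--
--     return matches
-- ===== SOURCE B (Python) =====
-- def match_losers(from_losers, from_winners, round_index):
--     n = len(from_losers)
--     assert n == len(from_winners)
--     r = round_index % 4
--     mid = n // 2
--
--     def idx(i):
--         if r == 0:
--             return i
--         if r == 1:
--             return (i + mid) % n
--         if r == 2:
--             return (n - 1 - i + mid) % n
--         return n - 1 - i
--
--     return [(from_losers[i], from_winners[idx(i)]) for i in range(n)]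
-- ===== Notes on version B (the rewrite author's own statement) =====
-- stated objective: alternative
-- what changed: B replaces the four slice/reverse rearrangements of from_winners by a single modular index map r -> idx(i) and pairs by computed index in one comprehension, never materialising a rearranged list.
-- outside the precondition, e.g. on match_losers([1, 2], [3], 0): A raises AssertionError, B raises AssertionError
import Mathlib
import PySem

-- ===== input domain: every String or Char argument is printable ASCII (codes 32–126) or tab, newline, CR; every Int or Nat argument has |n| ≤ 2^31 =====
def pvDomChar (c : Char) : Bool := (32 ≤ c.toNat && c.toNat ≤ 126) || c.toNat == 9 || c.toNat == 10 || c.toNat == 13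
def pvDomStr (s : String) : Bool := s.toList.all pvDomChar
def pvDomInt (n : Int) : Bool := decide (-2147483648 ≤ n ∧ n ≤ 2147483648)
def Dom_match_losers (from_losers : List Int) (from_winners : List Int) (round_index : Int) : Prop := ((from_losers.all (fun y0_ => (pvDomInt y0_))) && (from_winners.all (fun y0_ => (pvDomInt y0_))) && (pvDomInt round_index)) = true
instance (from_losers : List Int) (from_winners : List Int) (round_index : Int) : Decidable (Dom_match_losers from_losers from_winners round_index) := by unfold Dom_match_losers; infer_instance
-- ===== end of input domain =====

-- B pairs losers with winners through a modular index map instead of A's four slice/reverse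
-- rearrangements of from_winners (objective: alternative decomposition, same O(n) cost).

-- ===== PORT A =====
-- literal port of A; the 'assert len(from_losers) == len(from_winners)' is excluded by Pre_;
-- from_winners[::-1] is List.reverse, slices via PySem.List.slice
def match_losers (from_losers : List Int) (from_winners : List Int) (round_index : Int) : List (Int × Int) :=
  if from_losers.length = 1 then
    [(from_losers.getD 0 0, from_winners.getD 0 0)]  -- xs[0], in range under Pre_ and len = 1
  else
    let r := PySem.Int.mod round_index 4
    let fw :=
      if PySem.Int.mod r 4 = 0 then from_winners
      else if PySem.Int.mod r 4 = 1 then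
        let midpoint := from_winners.length / 2
        PySem.List.slice from_winners (some (midpoint : Int)) none ++
          PySem.List.slice from_winners none (some (midpoint : Int))
      else if PySem.Int.mod r 4 = 2 then
        let midpoint := from_winners.length / 2
        (PySem.List.slice from_winners (some (midpoint : Int)) none ++
          PySem.List.slice from_winners none (some (midpoint : Int))).reverse
      else from_winners.reverse
    from_losers.zip fw

-- ===== PORT B =====
def mlIdx (r : Int) (n mid i : Nat) : Nat :=
  if r = 0 then i
  else if r = 1 then (i + mid) % n
  else if r = 2 then (n - 1 - i + mid) % n
  else n - 1 - i

def match_losers_alt (from_losers : List Int) (from_winners : List Int) (round_index : Int) : List (Int × Int) :=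
  let n := from_losers.length
  let r := PySem.Int.mod round_index 4
  let mid := n / 2
  (List.range n).map (fun i => (from_losers.getD i 0, from_winners.getD (mlIdx r n mid i) 0))

-- ===== PRECONDITION & SPEC =====
-- Pre_ excludes exactly the inputs where A's assert fails (AssertionError): unequal lengths.
def Pre_match_losers (from_losers : List Int) (from_winners : List Int) (round_index : Int) : Prop :=
  from_losers.length = from_winners.length
instance (from_losers : List Int) (from_winners : List Int) (round_index : Int) : Decidable (Pre_match_losers from_losers from_winners round_index) := by unfold Pre_match_losers; infer_instance

def pvWitness_match_losers : List Int × List Int × Int := ([1, 2, 3, 4], ([5, 6, 7, 8], 1))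

def Spec_match_losers (from_losers : List Int) (from_winners : List Int) (round_index : Int) (out : List (Int × Int)) : Prop := out = match_losers_alt from_losers from_winners round_index
instance (from_losers : List Int) (from_winners : List Int) (round_index : Int) (out : List (Int × Int)) : Decidable (Spec_match_losers from_losers from_winners round_index out) := by unfold Spec_match_losers; infer_instance

-- ===== CLAIM (what is proved, stated in full; the proofs are below) =====
def Claim_equal_match_losers : Prop := ∀ (from_losers : List Int) (from_winners : List Int) (round_index : Int), Dom_match_losers from_losers from_winners round_index → Pre_match_losers from_losers from_winners round_index → Spec_match_losers from_losers from_winners round_index (match_losers from_losers from_winners round_index)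

-- ===== LEMMAS AND PROOFS =====

-- rotated list indexed = original list at (i + m) % n
lemma rot_getElem (l : List Int) (m i : Nat) (_hm : m ≤ l.length) (hi : i < l.length)
    (h1 : i < (l.drop m ++ l.take m).length) (h2 : (i + m) % l.length < l.length) :
    (l.drop m ++ l.take m)[i]'h1 = l[(i + m) % l.length]'h2 := by
  rcases Nat.lt_or_ge i (l.length - m) with h | h
  · rw [List.getElem_append_left (by simpa using h)]
    simp only [List.getElem_drop]
    congr 1
    rw [Nat.mod_eq_of_lt (by omega)]
    omega
  · rw [List.getElem_append_right (by simpa using h)]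
    simp only [List.getElem_take]
    congr 1
    have : i + m = (i + m - l.length) + 1 * l.length := by omega
    rw [this, Nat.add_mul_mod_self_right, Nat.mod_eq_of_lt (by omega)]
    simp; omega

lemma mod4_bounds (x : Int) : 0 ≤ PySem.Int.mod x 4 ∧ PySem.Int.mod x 4 < 4 := by
  rw [PySem.Int.mod_eq_emod_of_pos (by norm_num)]
  exact ⟨Int.emod_nonneg x (by norm_num), Int.emod_lt_of_pos x (by norm_num)⟩

lemma mlIdx_lt (r : Int) (n mid i : Nat) (_hm : mid ≤ n) (hi : i < n) : mlIdx r n mid i < n := by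
  unfold mlIdx
  have hn : 0 < n := by omega
  split_ifs <;> first | exact hi | exact Nat.mod_lt _ hn | omega

-- ===== VERDICT (by name: the statement is the Claim_ definition above) =====
theorem match_losers_spec : Claim_equal_match_losers := by
  intro fl fw ri _ hpre
  unfold Spec_match_losers Pre_match_losers at *
  unfold match_losers match_losers_alt
  set r := PySem.Int.mod ri 4 with hr
  have hrr : PySem.Int.mod r 4 = r := by
    rw [hr, PySem.Int.mod_eq_emod_of_pos (by norm_num),
        PySem.Int.mod_eq_emod_of_pos (by norm_num), Int.emod_emod_of_dvd _ (by norm_num)]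
  obtain ⟨hr0, hr4⟩ := mod4_bounds ri
  rw [← hr] at hr0 hr4
  by_cases h1 : fl.length = 1
  · -- len == 1 early return: every index formula yields 0
    simp only [h1, List.range_one, List.map_cons, List.map_nil]
    have : mlIdx r 1 0 0 = 0 := by unfold mlIdx; split_ifs <;> simp
    simp [this]
  · simp only [if_neg h1]
    have hml : fl.length / 2 ≤ fl.length := Nat.div_le_self _ _
    -- express A's rearranged winners via drop/take
    rw [PySem.List.slice_from_natCast, PySem.List.slice_to_natCast, hrr]
    apply List.ext_getElem
    · simp only [List.length_zip, List.length_map, List.length_range]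
      split_ifs <;> simp [hpre] <;> omega
    · intro i hA hB
      simp only [List.length_map, List.length_range] at hB
      have hiw : i < fw.length := by omega
      rw [List.getElem_map, List.getElem_range]
      have hidx : mlIdx r fl.length (fl.length / 2) i < fl.length := mlIdx_lt _ _ _ _ hml hB
      rw [List.getD_eq_getElem fl 0 hB, List.getD_eq_getElem fw 0 (by omega)]
      have hzl : ∀ (g : List Int) (hg : g.length = fw.length) (h : i < (fl.zip g).length),
          (fl.zip g)[i]'h = (fl[i]'hB, g[i]'(by omega)) := by
        intro g hg h; rw [List.getElem_zip]
      -- split on r ∈ {0,1,2,3}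
      rcases (by omega : r = 0 ∨ r = 1 ∨ r = 2 ∨ r = 3) with h | h | h | h
      all_goals simp only [h] at *
      · -- r = 0
        simp only [Int.reduceEq, reduceIte]
        rw [hzl fw rfl]
        unfold mlIdx; norm_num
      · -- r = 1
        simp only [Int.reduceEq, reduceIte]
        rw [hzl _ (by simp [← hpre]; omega)]
        have := rot_getElem fw (fw.length / 2) i (Nat.div_le_self _ _) hiw
          (by simp; omega) (Nat.mod_lt _ (by omega))
        rw [this]
        unfold mlIdx; simp only [Int.reduceEq, reduceIte]
        simp only [hpre]
      · -- r = 2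
        simp only [Int.reduceEq, reduceIte]
        rw [hzl _ (by simp [← hpre]; omega)]
        rw [List.getElem_reverse]
        have := rot_getElem fw (fw.length / 2) ((fw.drop (fw.length / 2) ++ fw.take (fw.length / 2)).length - 1 - i)
          (Nat.div_le_self _ _) (by simp; omega) (by simp; omega) (Nat.mod_lt _ (by omega))
        rw [this]
        unfold mlIdx; simp only [Int.reduceEq, reduceIte]
        simp only [hpre, List.length_append, List.length_drop, List.length_take]
        congr 1
        have harg : fw.length - fw.length / 2 + min (fw.length / 2) fw.length - 1 - i
            = fw.length - 1 - i := by omega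
        simp only [harg]
      · -- r = 3
        simp only [Int.reduceEq, reduceIte]
        rw [hzl _ (by simp [← hpre])]
        rw [List.getElem_reverse]
        unfold mlIdx; simp only [Int.reduceEq, reduceIte]
        simp only [hpre]
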